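-- pv_equiv track=rewrite | github.com/seret1234-dot/weiss-chess-training | bn_manual_sets/bn positions_24-3-2026/bn2/4/scan_sort_bn_by_mate_and_bk.py | get_black_king_square
-- ===== SOURCE A (Python) =====
-- def get_black_king_square(fen):
--     # fen example: "8/8/8/8/8/8/8/k7 w - - 0 1"
--     board = fen.split(" ")[0]
--     ranks = board.split("/")
--     for r_index, rank in enumerate(ranks):
--         file_index = 0
--         for char in rank:
--             if char.isdigit():
--                 file_index += int(char)
--             else:
--                 if char == "k":
--                     file_letter = "abcdefgh"[file_index]
--                     rank_number = 8 - r_index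
--                     return f"{file_letter}{rank_number}"
--                 file_index += 1
--     return "unknown"
-- ===== SOURCE B (Python) =====
-- def get_black_king_square(fen):
--     board = fen.split(" ")[0]
--     for r_index, rank in enumerate(board.split("/")):
--         expanded = "".join(" " * int(c) if c.isdigit() else c for c in rank)
--         pos = expanded.find("k")
--         if pos != -1:
--             return f"{'abcdefgh'[pos]}{8 - r_index}"
--     return "unknown"
-- ===== Notes on version B (the rewrite author's own statement) =====
-- stated objective: idiomatic
-- what changed: B drops A's running file_index accumulator: each rank is expanded into its literal board row (every digit d replaced by d blank characters) and the king is located with str.find, so the file index is read off as a string position instead of being accumulated.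
import Mathlib
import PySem

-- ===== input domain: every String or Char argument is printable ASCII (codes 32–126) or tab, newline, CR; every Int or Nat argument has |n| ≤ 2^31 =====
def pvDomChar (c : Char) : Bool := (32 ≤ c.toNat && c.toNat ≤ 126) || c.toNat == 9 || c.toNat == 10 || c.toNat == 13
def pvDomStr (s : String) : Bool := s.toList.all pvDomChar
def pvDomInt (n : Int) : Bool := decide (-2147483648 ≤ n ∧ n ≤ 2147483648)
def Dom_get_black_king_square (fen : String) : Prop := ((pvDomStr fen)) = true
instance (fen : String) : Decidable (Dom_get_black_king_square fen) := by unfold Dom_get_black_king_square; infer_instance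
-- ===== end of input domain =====

-- B replaces A's running file_index accumulator by expanding each rank (digit d ↦ d blanks)
-- and locating 'k' with str.find — a different decomposition (idiomatic), not faster.
-- ===== PORT A =====
-- inner 'for char in rank' loop of A; fi is file_index; result: none = exception raised
-- (ValueError from int(char) / IndexError from "abcdefgh"[fi]), some none = loop fell
-- through, some (some s) = early return of s.
def pvRankScanA (rIdx : Int) : List Char → Int → Option (Option String)
  | [], _ => some none
  | c :: rest, fi =>
    if PySem.Chars.isdigit c then
      match PySem.Int.ofChars? [c] with       -- int(char)
      | none => none
      | some d => pvRankScanA rIdx rest (fi + d)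
    else
      if c = 'k' then
        match PySem.Str.pyGet? "abcdefgh" fi with   -- "abcdefgh"[file_index]
        | none => none
        | some fl => some (some (String.singleton fl ++ PySem.Int.toStr (8 - rIdx)))
      else pvRankScanA rIdx rest (fi + 1)

-- outer 'for r_index, rank in enumerate(ranks)' loop of A
def pvRanksA : List String → Int → Option String
  | [], _ => some "unknown"
  | rank :: rest, r =>
    match pvRankScanA r rank.toList 0 with
    | none => none
    | some (some s) => some s
    | some none => pvRanksA rest (r + 1)

def get_black_king_square (fen : String) : String :=
  -- fen.split(" ")[0]: split with a non-empty separator never yields [], so [0] never raises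
  let board := ((PySem.Str.split? fen " ").getD []).getD 0 ""
  let ranks := (PySem.Str.split? board "/").getD []
  (pvRanksA ranks 0).getD ""    -- none (a raise) is excluded by Pre_

-- ===== PORT B =====
-- "".join(" " * int(c) if c.isdigit() else c for c in rank); none = ValueError from int(c)
def pvExpandB : List Char → Option (List Char)
  | [] => some []
  | c :: rest =>
    if PySem.Chars.isdigit c then
      match PySem.Int.ofChars? [c] with
      | none => none
      | some d => (pvExpandB rest).map (List.replicate d.toNat ' ' ++ ·)
    else (pvExpandB rest).map (c :: ·)

-- outer 'for r_index, rank in enumerate(board.split("/"))' loop of B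
def pvRanksB : List String → Int → Option String
  | [], _ => some "unknown"
  | rank :: rest, r =>
    match pvExpandB rank.toList with
    | none => none
    | some es =>
      let pos := PySem.Chars.find es ['k']    -- expanded.find("k")
      if pos ≠ -1 then
        match PySem.Str.pyGet? "abcdefgh" pos with
        | none => none
        | some fl => some (String.singleton fl ++ PySem.Int.toStr (8 - r))
      else pvRanksB rest (r + 1)

def get_black_king_square_alt (fen : String) : String :=
  let board := ((PySem.Str.split? fen " ").getD []).getD 0 ""
  let ranks := (PySem.Str.split? board "/").getD []
  (pvRanksB ranks 0).getD ""

-- ===== PRECONDITION & SPEC =====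
-- contribution of one rank character to the file index: a digit adds its value, else 1
def pvW (c : Char) : Nat :=
  if PySem.Chars.isdigit c then ((PySem.Int.ofChars? [c]).getD 0).toNat else 1

def pvPreB (fen : String) : Bool :=
  let board := ((PySem.Str.split? fen " ").getD []).getD 0 ""
  let ranks := (PySem.Str.split? board "/").getD []
  match ranks.find? (fun rk => rk.toList.contains 'k') with
  | none => true
  | some rk => decide (((rk.toList.takeWhile (· != 'k')).map pvW).sum < 8)

-- A raises IndexError exactly when, in the first rank containing 'k', the file index
-- accumulated before that first 'k' reaches 8; Pre_ excludes exactly those inputs.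
def Pre_get_black_king_square (fen : String) : Prop := pvPreB fen = true
instance (fen : String) : Decidable (Pre_get_black_king_square fen) := by
  unfold Pre_get_black_king_square; infer_instance

def pvWitness_get_black_king_square : String := "8/8/8/8/8/8/8/k7 w - - 0 1"

def Spec_get_black_king_square (fen : String) (out : String) : Prop := out = get_black_king_square_alt fen
instance (fen : String) (out : String) : Decidable (Spec_get_black_king_square fen out) := by unfold Spec_get_black_king_square; infer_instance

-- ===== CLAIM (what is proved, stated in full; the proofs are below) =====
def Claim_equal_get_black_king_square : Prop := ∀ (fen : String), Dom_get_black_king_square fen → Pre_get_black_king_square fen → Spec_get_black_king_square fen (get_black_king_square fen)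

-- ===== LEMMAS AND PROOFS =====

-- int(c) on an ASCII digit character succeeds with the digit's value
theorem pv_ofChars_digit (c : Char) (h : PySem.Chars.isdigit c = true) :
    PySem.Int.ofChars? [c] = some ((c.toNat : Int) - 48) := by
  have hb : 48 ≤ c.toNat ∧ c.toNat ≤ 57 := by
    simp only [PySem.Chars.isdigit, Bool.and_eq_true, decide_eq_true_eq, Char.le_def,
      UInt32.le_iff_toNat_le] at h
    exact h
  have hof : Char.ofNat c.toNat = c := Char.ofNat_toNat c
  obtain ⟨h1, h2⟩ := hb
  interval_cases h3 : c.toNat <;> (simp only [← hof]; decide)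

-- B's expansion never fails: int(c) succeeds on every character PySem.Chars.isdigit accepts
theorem pv_expand_some (cs : List Char) : ∃ es, pvExpandB cs = some es := by
  induction cs with
  | nil => exact ⟨[], rfl⟩
  | cons c rest ih =>
    obtain ⟨es, hes⟩ := ih
    by_cases hd : PySem.Chars.isdigit c = true
    · refine ⟨List.replicate (((c.toNat : Int)) - 48).toNat ' ' ++ es, ?_⟩
      simp [pvExpandB, hd, pv_ofChars_digit c hd, hes]
    · exact ⟨c :: es, by simp [pvExpandB, hd, hes]⟩

-- [c] is an infix iff c is a member
theorem pv_singleton_infix (c : Char) (es : List Char) : [c] <:+: es ↔ c ∈ es := by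
  constructor
  · intro h; exact h.sublist.subset (by simp)
  · intro h
    obtain ⟨l1, l2, rfl⟩ := List.append_of_mem h
    exact ⟨l1, l2, by simp⟩

-- [c] is a prefix iff the head is c
theorem pv_singleton_prefix (c : Char) (l : List Char) : [c] <+: l ↔ l.head? = some c := by
  constructor
  · rintro ⟨t, rfl⟩; rfl
  · intro h
    cases l with
    | nil => simp at h
    | cons a t => simp only [List.head?_cons, Option.some.injEq] at h; subst h; exact ⟨t, rfl⟩

-- find for a single-character needle: index of the first occurrence
theorem pv_find_singleton (es : List Char) (c : Char) :
    PySem.Chars.find es [c] =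
      if c ∈ es then ((es.takeWhile (· != c)).length : Int) else -1 := by
  by_cases h : c ∈ es
  · simp only [h, if_true]
    have hinf : [c] <:+: es := (pv_singleton_infix c es).mpr h
    have h0 : 0 ≤ PySem.Chars.find es [c] := (PySem.Chars.find_nonneg_iff es [c]).mpr hinf
    obtain ⟨hpre, hmin⟩ := PySem.Chars.find_spec h0
    rw [pv_singleton_prefix, List.head?_drop] at hpre
    set n := (PySem.Chars.find es [c]).toNat with hn
    set t := (es.takeWhile (· != c)).length with ht
    have htle : t ≤ es.length := by
      have := (List.takeWhile_prefix (l := es) (· != c)).length_le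
      omega
    have hdrop : es.drop t = es.dropWhile (· != c) := by
      conv_lhs => rw [← List.takeWhile_append_dropWhile (p := (· != c)) (l := es)]
      rw [ht, List.drop_left]
    have hdne : es.dropWhile (· != c) ≠ [] := by
      intro hemp
      have heq : es.takeWhile (· != c) = es := by
        conv_rhs => rw [← List.takeWhile_append_dropWhile (p := (· != c)) (l := es)]
        rw [hemp, List.append_nil]
      have := List.mem_takeWhile_imp (heq ▸ h)
      simp at this
    have hidx : es[t]? = some c := by
      have hh := List.head_dropWhile_not (· != c) hdne
      have hc' : (List.dropWhile (· != c) es).head hdne = c := by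
        simpa using hh
      rw [← List.head?_drop, hdrop, List.head?_eq_some_head hdne, hc']
    have hne : n = t := by
      rcases lt_trichotomy n t with hlt | he | hgt
      · exfalso
        have hlen : n < es.length := lt_of_lt_of_le hlt htle
        have hgetp : (es.takeWhile (· != c))[n]'(by omega) = es[n]'hlen :=
          (List.takeWhile_prefix _).getElem (by omega)
        have hmem : (es.takeWhile (· != c))[n]'(by omega) ∈ es.takeWhile (· != c) :=
          List.getElem_mem _
        have hp := List.mem_takeWhile_imp hmem
        rw [hgetp] at hp
        have : es[n]'hlen = c := by
          have := hpre
          rw [List.getElem?_eq_getElem hlen] at this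
          exact Option.some.injEq _ _ ▸ (by simpa using this)
        simp [this] at hp
      · exact he
      · exfalso
        exact hmin t hgt ((pv_singleton_prefix c _).mpr (by rw [List.head?_drop]; exact hidx))
    have : PySem.Chars.find es [c] = (n : Int) := (Int.toNat_of_nonneg h0).symm ▸ rfl
    omega
  · simp only [h, if_false]
    rw [PySem.Chars.find_eq_neg_one_iff, pv_singleton_infix]
    exact h

-- digit characters are at least '0'
theorem pv_digit_ge (c : Char) (h : PySem.Chars.isdigit c = true) : 48 ≤ c.toNat := by
  simp only [PySem.Chars.isdigit, Bool.and_eq_true, decide_eq_true_eq, Char.le_def,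
    UInt32.le_iff_toNat_le] at h
  exact h.1

-- A's inner scan, characterised through B's expansion of the same rank
theorem pv_scan_eq_expand (r : Int) (cs : List Char) (fi : Nat) :
    pvRankScanA r cs (fi : Int) =
      match pvExpandB cs with
      | none => none
      | some es =>
        if 'k' ∈ es then
          match PySem.Str.pyGet? "abcdefgh" ((fi : Int) + ((es.takeWhile (· != 'k')).length : Int)) with
          | none => none
          | some fl => some (some (String.singleton fl ++ PySem.Int.toStr (8 - r)))
        else some none := by
  induction cs generalizing fi with
  | nil => simp [pvRankScanA, pvExpandB]
  | cons c rest ih =>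
    obtain ⟨es', hes'⟩ := pv_expand_some rest
    by_cases hd : PySem.Chars.isdigit c = true
    · have hv := pv_ofChars_digit c hd
      have hge := pv_digit_ge c hd
      have hcast : (fi : Int) + ((c.toNat : Int) - 48) = ((fi + ((c.toNat:Int) - 48).toNat : Nat) : Int) := by
        omega
      have hmem : ('k' ∈ List.replicate ((c.toNat:Int) - 48).toNat ' ' ++ es') ↔ 'k' ∈ es' := by
        simp [List.mem_append, List.mem_replicate]
      have htw : (List.replicate ((c.toNat:Int) - 48).toNat ' ' ++ es').takeWhile (· != 'k')
          = List.replicate ((c.toNat:Int) - 48).toNat ' ' ++ es'.takeWhile (· != 'k') :=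
        List.takeWhile_append_of_pos (by intro x hx; simp [List.eq_of_mem_replicate hx])
      simp only [pvRankScanA, pvExpandB, hd, if_true, hv, hes', Option.map_some]
      rw [hcast, ih, hes']
      dsimp only
      by_cases hk : 'k' ∈ es'
      · rw [if_pos hk, if_pos (hmem.mpr hk), htw]
        simp only [List.length_append, List.length_replicate]
        have harg : ((fi + ((c.toNat:Int) - 48).toNat : Nat) : Int) + ((es'.takeWhile (· != 'k')).length : Int)
            = (fi : Int) + ((((c.toNat:Int) - 48).toNat + (es'.takeWhile (· != 'k')).length : Nat) : Int) := by
          push_cast; ring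
        rw [harg]
      · rw [if_neg hk, if_neg (fun hh => hk (hmem.mp hh))]
    · have hd' : PySem.Chars.isdigit c = false := by simpa using hd
      by_cases hk : c = 'k'
      · subst hk
        simp only [pvRankScanA, pvExpandB, hd', Bool.false_eq_true, if_false, hes',
          Option.map_some, reduceIte]
        rw [if_pos List.mem_cons_self]
        have htw0 : (('k' :: es').takeWhile (· != 'k')) = [] := by simp
        rw [htw0]
        simp
      · simp only [pvRankScanA, pvExpandB, hd', Bool.false_eq_true, if_false, if_neg hk,
          hes', Option.map_some]
        have hstep : (fi : Int) + 1 = ((fi + 1 : Nat) : Int) := by push_cast; ring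
        rw [hstep, ih, hes']
        dsimp only
        have htw : ((c :: es').takeWhile (· != 'k')) = c :: es'.takeWhile (· != 'k') := by
          simp [hk]
        by_cases hm : 'k' ∈ es'
        · rw [if_pos hm, if_pos (by simp [hm]), htw]
          simp only [List.length_cons]
          have harg : ((fi + 1 : Nat) : Int) + ((es'.takeWhile (· != 'k')).length : Int)
              = (fi : Int) + (((es'.takeWhile (· != 'k')).length + 1 : Nat) : Int) := by
            push_cast; ring
          rw [harg]
        · rw [if_neg hm, if_neg (by simp [hm, Ne.symm hk])]

-- the two outer loops agree
theorem pv_ranks_eq (ranks : List String) (r : Int) :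
    pvRanksA ranks r = pvRanksB ranks r := by
  induction ranks generalizing r with
  | nil => rfl
  | cons rank rest ih =>
    obtain ⟨es, hes⟩ := pv_expand_some rank.toList
    have hscan := pv_scan_eq_expand r rank.toList 0
    simp only [Nat.cast_zero] at hscan
    simp only [pvRanksA, pvRanksB, hscan, hes, pv_find_singleton]
    by_cases hm : 'k' ∈ es
    · rw [if_pos hm, if_pos hm]
      have hpos : ¬ (((es.takeWhile (· != 'k')).length : Int) = -1) := by omega
      rw [if_pos hpos]
      simp only [zero_add]
      cases hpg : PySem.Str.pyGet? "abcdefgh" ((es.takeWhile (· != 'k')).length : Int) <;>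
        simp
    · rw [if_neg hm, if_neg hm, if_neg (by simp)]
      exact ih (r + 1)

-- ===== VERDICT (by name: the statement is the Claim_ definition above) =====
theorem get_black_king_square_spec : Claim_equal_get_black_king_square := by
  intro fen _ _
  unfold Spec_get_black_king_square get_black_king_square get_black_king_square_alt
  simp only [pv_ranks_eq]
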